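-- pv_equiv track=rewrite | github.com/haoeric/GenomicDataScienceSpecialization_Notes | Algorithms_for_DNA_Sequencing_quiz3.py | editDistance2
-- ===== SOURCE A (Python) =====
-- def editDistance2(x, y):
--     """ this is like the local alignment function but did not allow substring of x """
--
--     # initialize distance matrix
--     D = []
--     for i in range(len(x)+1):
--         D.append([0]*(len(y)+1))
--     for i in range(len(x)+1):
--         D[i][0] = i
--     for i in range(len(y)+1):
--         ## here is the only difference from 'editDistance' function above
--         D[0][i] = 0  # allow start in any place of y with no penality before that position
--
--     for i in range(1, len(x)+1):
--         for j in range(1, len(y)+1):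
--             distHor = D[i][j-1] + 1
--             distVer = D[i-1][j] + 1
--             if x[i-1] == y[j-1]:
--                 distDiag = D[i-1][j-1]
--             else:
--                 distDiag = D[i-1][j-1] + 1
--             D[i][j] = min(distHor, distVer, distDiag)
--     return min(D[-1])
-- ===== SOURCE B (Python) =====
-- def editDistance2(x, y):
--     """Top-down memoized recurrence dist(i,j) over x[:i], y[:j] instead of a bottom-up matrix."""
--     w = len(y) + 1
--     memo = {}
--     def dist(i, j):
--         if j == 0:
--             return i
--         if i == 0:
--             return 0
--         k = i * w + j
--         v = memo.get(k)
--         if v is None: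
--             d = dist(i - 1, j - 1)
--             if x[i - 1] != y[j - 1]:
--                 d += 1
--             v = min(dist(i, j - 1) + 1, dist(i - 1, j) + 1, d)
--             memo[k] = v
--         return v
--     return min(dist(len(x), j) for j in range(w))
-- ===== Notes on version B (the rewrite author's own statement) =====
-- stated objective: alternative
-- what changed: B replaces A's bottom-up (m+1)x(n+1) matrix (three initialisation loops plus nested in-place index updates) with a top-down memoized recurrence dist(i,j) with base cases dist(i,0)=i and dist(0,j)=0, cached in a dict keyed by i*w+j, the answer being min(dist(m,j) for j in range(n+1)); demand-driven recursion instead of table filling.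
import Mathlib
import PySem

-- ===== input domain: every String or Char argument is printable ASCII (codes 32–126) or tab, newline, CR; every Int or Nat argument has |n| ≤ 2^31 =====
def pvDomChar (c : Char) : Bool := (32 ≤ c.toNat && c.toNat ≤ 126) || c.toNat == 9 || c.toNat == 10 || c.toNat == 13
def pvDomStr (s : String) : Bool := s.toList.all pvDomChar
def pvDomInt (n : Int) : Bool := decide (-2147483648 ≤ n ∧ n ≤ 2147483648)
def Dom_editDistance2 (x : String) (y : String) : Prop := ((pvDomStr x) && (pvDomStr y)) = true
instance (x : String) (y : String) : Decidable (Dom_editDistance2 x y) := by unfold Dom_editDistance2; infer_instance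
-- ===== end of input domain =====

-- B replaces A's bottom-up matrix with a top-down memoized recurrence dist(i,j) (dict cache, demand-driven); return values are identical.

-- ===== PORT A =====
def editDistance2 (x : String) (y : String) : Int :=
  let xs := x.toList
  let ys := y.toList
  let m := xs.length
  let n := ys.length
  -- D = []; for i in range(len(x)+1): D.append([0]*(len(y)+1))
  let D : List (List Int) :=
    (List.range (m+1)).foldl (fun D _ => D ++ [List.replicate (n+1) (0:Int)]) []
  -- for i in range(len(x)+1): D[i][0] = i
  let D := (List.range (m+1)).foldl (fun D i => D.set i ((D.getD i []).set 0 (i:Int))) D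
  -- for i in range(len(y)+1): D[0][i] = 0
  let D := (List.range (n+1)).foldl (fun D i => D.set 0 ((D.getD 0 []).set i 0)) D
  -- for i in range(1, len(x)+1): for j in range(1, len(y)+1): …
  let D := (List.range m).foldl (fun D i0 =>
    (List.range n).foldl (fun D j0 =>
      let i := i0 + 1
      let j := j0 + 1
      let distHor := (D.getD i []).getD (j-1) 0 + 1
      let distVer := (D.getD (i-1) []).getD j 0 + 1
      let distDiag :=
        if xs.getD (i-1) ' ' = ys.getD (j-1) ' ' then (D.getD (i-1) []).getD (j-1) 0
        else (D.getD (i-1) []).getD (j-1) 0 + 1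
      D.set i ((D.getD i []).set j (min (min distHor distVer) distDiag))) D) D
  -- return min(D[-1])
  (PySem.List.min? ((PySem.List.pyGet? D (-1)).getD []) (fun v => v)).getD 0

-- ===== PORT B =====
-- dist(i, j) of Source B, threading the memo dict (key i*w+j, looked up with .get);
-- branch order as in Source B: 'if j == 0: return i', 'if i == 0: return 0', then cache check.
def bdist (xs ys : List Char) (w : Nat) : Nat → Nat → PySem.Dict Nat Int → Int × PySem.Dict Nat Int
  | i, 0, memo => ((i : Int), memo)
  | 0, _ + 1, memo => (0, memo)
  | i + 1, j + 1, memo =>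
    let k := (i + 1) * w + (j + 1)
    match memo.get? k with
    | some v => (v, memo)
    | none =>
      let p1 := bdist xs ys w i j memo                 -- d = dist(i-1, j-1)
      let d := if xs.getD i ' ' ≠ ys.getD j ' ' then p1.1 + 1 else p1.1
      let p2 := bdist xs ys w (i + 1) j p1.2           -- dist(i, j-1)
      let p3 := bdist xs ys w i (j + 1) p2.2           -- dist(i-1, j)
      let v := min (min (p2.1 + 1) (p3.1 + 1)) d
      (v, p3.2.insert k v)
termination_by i j => i + j
decreasing_by all_goals omega

-- min(dist(len(x), j) for j in range(w)): running min (none until the first item), memo threaded through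
def editDistance2_alt (x : String) (y : String) : Int :=
  let xs := x.toList
  let ys := y.toList
  let w := ys.length + 1
  let r := (List.range w).foldl
    (fun (p : Option Int × PySem.Dict Nat Int) j =>
      let q := bdist xs ys w xs.length j p.2
      (some (match p.1 with | none => q.1 | some b => min b q.1), q.2))
    (none, PySem.Dict.empty)
  r.1.getD 0

-- ===== PRECONDITION & SPEC =====
def Spec_editDistance2 (x : String) (y : String) (out : Int) : Prop := out = editDistance2_alt x y
instance (x : String) (y : String) (out : Int) : Decidable (Spec_editDistance2 x y out) := by unfold Spec_editDistance2; infer_instance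

-- ===== CLAIM (what is proved, stated in full; the proofs are below) =====
def Claim_equal_editDistance2 : Prop := ∀ (x : String) (y : String), Dom_editDistance2 x y → Spec_editDistance2 x y (editDistance2 x y)

-- ===== LEMMAS AND PROOFS =====

-- row i of A's matrix right after the three initialisation loops
def edInitRow (n i : Nat) : List Int := ((i : Int)) :: List.replicate n 0

-- the next DP row from the previous one (proof-side characterisation of one row step)
def edRowStep (cx : Char) : List Char → List Int → Int → Int → List Int
  | cy :: ys, up :: rest, diag, left =>
    let v := min (min (left + 1) (up + 1)) (diag + (if cx = cy then 0 else 1))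
    v :: edRowStep cx ys rest up v
  | _, _, _, _ => []

def edNextRow (cx : Char) (i : Int) (ys : List Char) (prev : List Int) : List Int :=
  match prev with
  | d0 :: rest => i :: edRowStep cx ys rest d0 i
  | [] => [i]

-- row i of the DP, shared characterisation of both programs
def edRowIt (xs ys : List Char) : Nat → List Int
  | 0 => List.replicate (ys.length + 1) 0
  | k+1 => edNextRow (xs.getD k ' ') ((k : Int) + 1) ys (edRowIt xs ys k)

-- cell (i, j) of the DP
def edE (xs ys : List Char) (i j : Nat) : Int := (edRowIt xs ys i).getD j 0

-- getD / set basics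
theorem edGetD_set_self {α : Type} (l : List α) (i : Nat) (v d : α) (h : i < l.length) :
    (l.set i v).getD i d = v := by
  simp [List.getD_eq_getElem?_getD, List.getElem?_set_self h]

theorem edGetD_set_ne {α : Type} (l : List α) (i j : Nat) (v d : α) (h : i ≠ j) :
    (l.set i v).getD j d = l.getD j d := by
  simp [List.getD_eq_getElem?_getD, List.getElem?_set_ne h]

theorem edSet_append_len {α : Type} (a c : List α) (b v : α) :
    (a ++ b :: c).set a.length v = a ++ v :: c := by
  induction a with
  | nil => simp
  | cons x a ih => simp [ih]

theorem edGetD_append_len {α : Type} (a c : List α) (b d : α) :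
    (a ++ b :: c).getD a.length d = b := by
  induction a with
  | nil => simp
  | cons x a _ => simp

theorem edSet_getD_self {α : Type} (l : List α) (i : Nat) (d : α) (h : i < l.length) :
    l.set i (l.getD i d) = l := by
  simp [List.getD_eq_getElem?_getD, List.getElem?_eq_getElem h, List.set_getElem_self]

theorem edGetD_take {α : Type} (l : List α) (j t : Nat) (d : α) (h : t < j) :
    (l.take j).getD t d = l.getD t d := by
  simp [List.getD_eq_getElem?_getD, h]

theorem edFoldl_id {α β : Type} (f : α → β → α) (l : List β) (D : α)
    (h : ∀ i ∈ l, f D i = D) : l.foldl f D = D := by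
  induction l with
  | nil => rfl
  | cons b l ih =>
    rw [List.foldl_cons, h b (by simp)]
    exact ih (fun i hi => h i (by simp [hi]))

theorem edRowStep_length (cx : Char) : ∀ (ys : List Char) (rest : List Int) (diag left : Int),
    (edRowStep cx ys rest diag left).length = min ys.length rest.length := by
  intro ys
  induction ys with
  | nil => intro rest diag left; cases rest <;> simp [edRowStep]
  | cons cy ys ih =>
    intro rest diag left
    cases rest with
    | nil => simp [edRowStep]
    | cons up rest => simp [edRowStep, ih, Nat.succ_min_succ]

theorem edRowIt_length (xs ys : List Char) (k : Nat) :
    (edRowIt xs ys k).length = ys.length + 1 := by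
  induction k with
  | zero => simp [edRowIt]
  | succ k ih =>
    rw [edRowIt]
    cases h : edRowIt xs ys k with
    | nil => rw [h] at ih; simp at ih
    | cons p0 rest =>
      rw [h] at ih
      simp only [List.length_cons] at ih
      simp [edNextRow, edRowStep_length]
      omega

-- the elementwise recurrence satisfied by edRowStep
theorem edRowStep_getD (cx : Char) : ∀ (k : Nat) (ys : List Char) (rest : List Int)
    (diag left : Int), k < ys.length → ys.length = rest.length →
    (edRowStep cx ys rest diag left).getD k 0 =
      min (min ((if k = 0 then left else (edRowStep cx ys rest diag left).getD (k-1) 0) + 1)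
               (rest.getD k 0 + 1))
          ((if k = 0 then diag else rest.getD (k-1) 0) + (if cx = ys.getD k ' ' then 0 else 1)) := by
  intro k
  induction k with
  | zero =>
    intro ys rest diag left hk hlen
    cases ys with
    | nil => simp at hk
    | cons cy ys =>
      cases rest with
      | nil => simp at hlen
      | cons up rest => simp [edRowStep]
  | succ k ih =>
    intro ys rest diag left hk hlen
    cases ys with
    | nil => simp at hk
    | cons cy ys =>
      cases rest with
      | nil => simp at hlen
      | cons up rest =>
        have hk' : k < ys.length := by simpa using hk
        have hlen' : ys.length = rest.length := by simpa using hlen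
        have := ih ys rest up
          (min (min (left + 1) (up + 1)) (diag + (if cx = cy then 0 else 1))) hk' hlen'
        simp only [edRowStep, List.getD_cons_succ]
        rw [this]
        cases k with
        | zero => simp
        | succ k => simp

theorem edRowStep_take_snoc (cx : Char) (ys : List Char) (rest : List Int)
    (diag left : Int) (j : Nat) (hj : j < ys.length) (hlen : ys.length = rest.length) :
    (edRowStep cx ys rest diag left).take (j+1) =
      (edRowStep cx ys rest diag left).take j ++
        [(edRowStep cx ys rest diag left).getD j 0] := by
  have hlt : j < (edRowStep cx ys rest diag left).length := by
    rw [edRowStep_length]; omega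
  rw [List.take_add_one]
  simp [List.getD_eq_getElem?_getD, List.getElem?_eq_getElem hlt]

-- ===== A's inner loop =====
-- After the inner fold, row i0+1 of D is exactly edNextRow of row i0.
theorem edInner (xs ys : List Char) (i0 : Nat) (D : List (List Int)) (p0 : Int)
    (ptail : List Int) (hlen : i0 + 1 < D.length) (hplen : ptail.length = ys.length)
    (hprev : D.getD i0 [] = p0 :: ptail)
    (hcur : D.getD (i0+1) [] = ((i0 : Int) + 1) :: List.replicate ys.length 0) :
    (List.range ys.length).foldl (fun D j0 =>
      let i := i0 + 1
      let j := j0 + 1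
      let distHor := (D.getD i []).getD (j-1) 0 + 1
      let distVer := (D.getD (i-1) []).getD j 0 + 1
      let distDiag :=
        if xs.getD (i-1) ' ' = ys.getD (j-1) ' ' then (D.getD (i-1) []).getD (j-1) 0
        else (D.getD (i-1) []).getD (j-1) 0 + 1
      D.set i ((D.getD i []).set j (min (min distHor distVer) distDiag))) D
    = D.set (i0+1) (edNextRow (xs.getD i0 ' ') ((i0 : Int) + 1) ys (p0 :: ptail)) := by
  set n := ys.length with hn
  set cx := xs.getD i0 ' ' with hcx
  set out := edRowStep cx ys ptail p0 ((i0 : Int) + 1) with hout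
  have houtlen : out.length = n := by
    rw [hout, edRowStep_length, hplen]; omega
  have aux : ∀ j, j ≤ n → (List.range j).foldl (fun D j0 =>
      let i := i0 + 1
      let j := j0 + 1
      let distHor := (D.getD i []).getD (j-1) 0 + 1
      let distVer := (D.getD (i-1) []).getD j 0 + 1
      let distDiag :=
        if xs.getD (i-1) ' ' = ys.getD (j-1) ' ' then (D.getD (i-1) []).getD (j-1) 0
        else (D.getD (i-1) []).getD (j-1) 0 + 1
      D.set i ((D.getD i []).set j (min (min distHor distVer) distDiag))) D
      = D.set (i0+1) (((i0 : Int) + 1) :: (out.take j ++ List.replicate (n-j) 0)) := by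
    intro j
    induction j with
    | zero =>
      intro _
      simp only [List.range_zero, List.foldl_nil, List.take_zero, Nat.sub_zero,
        List.nil_append, ← hcur]
      rw [edSet_getD_self D (i0+1) [] (by omega)]
    | succ j ihj =>
      intro hj
      rw [List.range_succ, List.foldl_append, ihj (by omega), List.foldl_cons, List.foldl_nil]
      set cj : List Int := ((i0 : Int) + 1) :: (out.take j ++ List.replicate (n-j) 0) with hcj
      have hcjlen : cj.length = n + 1 := by
        simp [hcj, List.length_take, houtlen]
        omega
      have hSlen : (D.set (i0+1) cj).length = D.length := by simp
      dsimp only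
      have e1 : i0 + 1 - 1 = i0 := by omega
      have e2 : j + 1 - 1 = j := by omega
      rw [e1, e2, List.set_set, edGetD_set_self D (i0+1) cj [] (by omega),
        edGetD_set_ne D (i0+1) i0 cj [] (by omega), hprev]
      -- value written equals out[j]
      have htake : (out.take j).length = j := by rw [List.length_take]; omega
      have hcget : cj.getD j 0 = if j = 0 then (i0 : Int) + 1 else out.getD (j-1) 0 := by
        cases j with
        | zero => simp [hcj]
        | succ t =>
          simp only [hcj, List.getD_cons_succ]
          have h1 : (out.take (t+1) ++ List.replicate (n-(t+1)) (0:Int)).getD t 0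
              = (out.take (t+1)).getD t 0 := by
            apply List.getD_append
            rw [List.length_take]; omega
          rw [h1, edGetD_take out (t+1) t 0 (by omega)]
          simp
      have hrec := edRowStep_getD cx j ys ptail p0 ((i0 : Int) + 1) (by omega) hplen.symm
      have hval : min (min (cj.getD j 0 + 1) ((p0 :: ptail).getD (j+1) 0 + 1))
          (if cx = ys.getD j ' ' then (p0 :: ptail).getD j 0
           else (p0 :: ptail).getD j 0 + 1) = out.getD j 0 := by
        rw [← hout] at hrec
        rw [hrec, hcget]
        have hpj : (p0 :: ptail).getD j 0 = if j = 0 then p0 else ptail.getD (j-1) 0 := by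
          cases j <;> simp
        rw [hpj]
        simp only [List.getD_cons_succ]
        split_ifs <;> omega
      rw [hval]
      -- the updated row is c_{j+1}
      congr 1
      have hrepl : List.replicate (n-j) (0:Int) = 0 :: List.replicate (n-j-1) 0 := by
        rw [← List.replicate_succ]; congr 1; omega
      rw [hcj, hrepl, List.set_cons_succ]
      have hset : (out.take j ++ (0:Int) :: List.replicate (n-j-1) 0).set j (out.getD j 0)
          = out.take j ++ out.getD j 0 :: List.replicate (n-j-1) 0 := by
        have h := edSet_append_len (out.take j) (List.replicate (n-j-1) (0:Int)) 0 (out.getD j 0)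
        rw [htake] at h
        exact h
      rw [hset]
      rw [edRowStep_take_snoc cx ys ptail p0 ((i0 : Int) + 1) j (by omega) hplen.symm]
      have hsub : n - j - 1 = n - (j+1) := by omega
      simp only [← hout, List.append_assoc, List.singleton_append, hsub]
  rw [aux n le_rfl]
  congr 1
  rw [Nat.sub_self, List.replicate_zero, List.append_nil,
    List.take_of_length_le (by omega), edNextRow, ← hout]

-- ===== A's three initialisation loops =====
theorem edInitSet (m n : Nat) : ∀ k, k ≤ m + 1 →
    (List.range k).foldl (fun D i => D.set i ((D.getD i []).set 0 (i:Int)))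
      (List.replicate (m+1) (List.replicate (n+1) (0:Int)))
    = (List.range k).map (edInitRow n) ++
        List.replicate (m+1-k) (List.replicate (n+1) (0:Int)) := by
  intro k
  induction k with
  | zero => simp
  | succ k ih =>
    intro hk
    rw [List.range_succ, List.foldl_append, ih (by omega), List.foldl_cons, List.foldl_nil]
    have hrep : List.replicate (m+1-k) (List.replicate (n+1) (0:Int)) =
        List.replicate (n+1) (0:Int) :: List.replicate (m-k) (List.replicate (n+1) (0:Int)) := by
      rw [← List.replicate_succ]
      congr 1
      omega
    rw [hrep]
    have hlen : ((List.range k).map (edInitRow n)).length = k := by simp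
    set A := (List.range k).map (edInitRow n) with hA
    set z := List.replicate (n+1) (0:Int) with hz
    set C := List.replicate (m-k) (List.replicate (n+1) (0:Int)) with hC
    have g1 : (A ++ z :: C).getD k [] = z := by rw [← hlen]; exact edGetD_append_len A C z []
    have g2 : ∀ v, (A ++ z :: C).set k v = A ++ v :: C := by
      intro v; rw [← hlen]; exact edSet_append_len A C z v
    rw [g1, g2]
    have : z.set 0 (k:Int) = edInitRow n k := by
      simp [hz, List.replicate_succ, edInitRow]
    rw [this, List.map_append (l₂ := [k])]
    simp only [List.map_cons, List.map_nil]
    have hsub : m + 1 - (k+1) = m - k := by omega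
    rw [hsub, hA, hz, hC, List.append_assoc, List.singleton_append]

theorem edInit (m n : Nat) :
    ((List.range (n+1)).foldl (fun D i => D.set 0 ((D.getD 0 []).set i 0))
      ((List.range (m+1)).foldl (fun D i => D.set i ((D.getD i []).set 0 (i:Int)))
        ((List.range (m+1)).foldl (fun D _ => D ++ [List.replicate (n+1) (0:Int)]) [])))
    = (List.range (m+1)).map (edInitRow n) := by
  rw [PySem.List.foldl_append_singleton_eq_map, List.nil_append, List.map_const',
    List.length_range, edInitSet m n (m+1) le_rfl, Nat.sub_self, List.replicate_zero,
    List.append_nil]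
  apply edFoldl_id
  intro i _
  have hD : (List.range (m+1)).map (edInitRow n) =
      edInitRow n 0 :: (List.range' 1 m).map (edInitRow n) := by
    rw [List.range_eq_range', List.range'_succ, List.map_cons]
  rw [hD]
  simp only [List.getD_cons_zero, List.set_cons_zero]
  have h0 : edInitRow n 0 = List.replicate (n+1) (0:Int) := by
    simp [edInitRow, List.replicate_succ]
  rw [h0, List.set_replicate_self]

-- ===== A's outer loop =====
theorem edOuter (xs ys : List Char) :
    (List.range xs.length).foldl (fun D i0 =>
      (List.range ys.length).foldl (fun D j0 =>
        let i := i0 + 1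
        let j := j0 + 1
        let distHor := (D.getD i []).getD (j-1) 0 + 1
        let distVer := (D.getD (i-1) []).getD j 0 + 1
        let distDiag :=
          if xs.getD (i-1) ' ' = ys.getD (j-1) ' ' then (D.getD (i-1) []).getD (j-1) 0
          else (D.getD (i-1) []).getD (j-1) 0 + 1
        D.set i ((D.getD i []).set j (min (min distHor distVer) distDiag))) D)
      ((List.range (xs.length+1)).map (edInitRow ys.length))
    = (List.range (xs.length+1)).map (edRowIt xs ys) := by
  set m := xs.length with hm
  set n := ys.length with hn
  have h0 : edRowIt xs ys 0 = edInitRow n 0 := by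
    simp [edRowIt, edInitRow, List.replicate_succ, ← hn]
  have aux : ∀ k, k ≤ m → (List.range k).foldl (fun D i0 =>
      (List.range n).foldl (fun D j0 =>
        let i := i0 + 1
        let j := j0 + 1
        let distHor := (D.getD i []).getD (j-1) 0 + 1
        let distVer := (D.getD (i-1) []).getD j 0 + 1
        let distDiag :=
          if xs.getD (i-1) ' ' = ys.getD (j-1) ' ' then (D.getD (i-1) []).getD (j-1) 0
          else (D.getD (i-1) []).getD (j-1) 0 + 1
        D.set i ((D.getD i []).set j (min (min distHor distVer) distDiag))) D)
      ((List.range (m+1)).map (edInitRow n))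
      = (List.range (k+1)).map (edRowIt xs ys) ++
          (List.range' (k+1) (m-k)).map (edInitRow n) := by
    intro k
    induction k with
    | zero =>
      intro _
      rw [List.range_zero, List.foldl_nil]
      rw [show (0+1 : Nat) = 1 from rfl, List.range_one, List.map_singleton, h0,
        List.singleton_append, Nat.sub_zero]
      rw [List.range_eq_range' (n := m+1), List.range'_succ]
      simp
    | succ k ihk =>
      intro hk
      rw [List.range_succ (n := k), List.foldl_append, ihk (by omega), List.foldl_cons, List.foldl_nil]
      set A := (List.range (k+1)).map (edRowIt xs ys) with hA
      have hAlen : A.length = k + 1 := by simp [hA]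
      have hB : (List.range' (k+1) (m-k)).map (edInitRow n)
          = edInitRow n (k+1) :: (List.range' (k+2) (m-(k+1))).map (edInitRow n) := by
        have : m - k = (m - (k+1)) + 1 := by omega
        rw [this, List.range'_succ, List.map_cons]
      rw [hB]
      set B' := (List.range' (k+2) (m-(k+1))).map (edInitRow n) with hB'
      obtain ⟨p0, ptail, hpe⟩ : ∃ p0 ptail, edRowIt xs ys k = p0 :: ptail := by
        cases h : edRowIt xs ys k with
        | nil => have := edRowIt_length xs ys k; rw [h] at this; simp at this
        | cons a b => exact ⟨a, b, rfl⟩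
      have hplen : ptail.length = n := by
        have := edRowIt_length xs ys k
        rw [hpe] at this
        simpa using this
      have hprev : (A ++ edInitRow n (k+1) :: B').getD k [] = p0 :: ptail := by
        rw [List.getD_append _ _ _ _ (by omega)]
        rw [← hpe, hA]
        simp [List.getD_eq_getElem?_getD]
      have hcur : (A ++ edInitRow n (k+1) :: B').getD (k+1) [] =
          ((k : Int) + 1) :: List.replicate n 0 := by
        have h := edGetD_append_len A B' (edInitRow n (k+1)) []
        rw [hAlen] at h
        rw [h, edInitRow]
        push_cast
        rfl
      rw [edInner xs ys k (A ++ edInitRow n (k+1) :: B') p0 ptail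
        (by simp only [List.length_append, List.length_cons, hAlen]; omega) hplen hprev hcur]
      have hsetA := edSet_append_len A B' (edInitRow n (k+1))
        (edNextRow (xs.getD k ' ') ((k : Int) + 1) ys (p0 :: ptail))
      rw [hAlen] at hsetA
      rw [hsetA, ← hpe, hA]
      rw [List.range_succ (n := k+1), List.map_append, List.map_singleton,
        List.append_assoc, List.singleton_append]
      rw [show edNextRow (xs.getD k ' ') ((k : Int) + 1) ys (edRowIt xs ys k)
            = edRowIt xs ys (k+1) from rfl]
  have := aux m le_rfl
  rw [this, Nat.sub_self, List.range'_zero, List.map_nil, List.append_nil]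

-- ===== the cell recurrence for edE =====
theorem edNextRow_getD_zero (cx : Char) (i : Int) (ys : List Char) (prev : List Int) :
    (edNextRow cx i ys prev).getD 0 0 = i := by
  cases prev <;> simp [edNextRow]

theorem edE_i0 (xs ys : List Char) (i : Nat) : edE xs ys i 0 = (i : Int) := by
  cases i with
  | zero => simp [edE, edRowIt, List.getD_eq_getElem?_getD, List.replicate_succ]
  | succ k =>
    rw [edE, edRowIt, edNextRow_getD_zero]
    push_cast
    ring

theorem edE_0j (xs ys : List Char) (j : Nat) (hj : j ≤ ys.length) : edE xs ys 0 j = 0 := by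
  simp [edE, edRowIt, List.getD_eq_getElem?_getD, Nat.lt_succ_of_le hj]

theorem edE_rec (xs ys : List Char) (i j : Nat) (hj : j < ys.length) :
    edE xs ys (i+1) (j+1) =
      min (min (edE xs ys (i+1) j + 1) (edE xs ys i (j+1) + 1))
          (edE xs ys i j + (if xs.getD i ' ' = ys.getD j ' ' then 0 else 1)) := by
  obtain ⟨p0, ptail, hpe⟩ : ∃ p0 ptail, edRowIt xs ys i = p0 :: ptail := by
    cases h : edRowIt xs ys i with
    | nil => have := edRowIt_length xs ys i; rw [h] at this; simp at this
    | cons a b => exact ⟨a, b, rfl⟩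
  have hplen : ptail.length = ys.length := by
    have := edRowIt_length xs ys i
    rw [hpe] at this
    simpa using this
  have hrow : edRowIt xs ys (i+1) =
      ((i : Int) + 1) :: edRowStep (xs.getD i ' ') ys ptail p0 ((i : Int) + 1) := by
    rw [edRowIt, hpe, edNextRow]
  have hrec := edRowStep_getD (xs.getD i ' ') j ys ptail p0 ((i : Int) + 1) hj hplen.symm
  simp only [edE, hrow, hpe, List.getD_cons_succ]
  rw [hrec]
  cases j with
  | zero => simp
  | succ t => simp

-- ===== the memo invariant and correctness of bdist =====
theorem edKey_inj (w i i' j j' : Nat) (hj : j < w) (hj' : j' < w)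
    (h : i * w + j = i' * w + j') : i = i' ∧ j = j' := by
  have hw : 0 < w := by omega
  have e1 : (w * i + j) / w = i := by
    rw [Nat.mul_add_div hw, Nat.div_eq_of_lt hj, Nat.add_zero]
  have e2 : (w * i' + j') / w = i' := by
    rw [Nat.mul_add_div hw, Nat.div_eq_of_lt hj', Nat.add_zero]
  have e3 : (w * i + j) % w = j := by
    rw [Nat.mul_add_mod, Nat.mod_eq_of_lt hj]
  have e4 : (w * i' + j') % w = j' := by
    rw [Nat.mul_add_mod, Nat.mod_eq_of_lt hj']
  have h' : w * i + j = w * i' + j' := by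
    rw [Nat.mul_comm w i, Nat.mul_comm w i']; exact h
  constructor
  · rw [← e1, ← e2, h']
  · rw [← e3, ← e4, h']

def edMemoInv (xs ys : List Char) (memo : PySem.Dict Nat Int) : Prop :=
  ∀ i j v, j < ys.length →
    memo.get? ((i+1) * (ys.length+1) + (j+1)) = some v → v = edE xs ys (i+1) (j+1)

theorem bdist_spec (xs ys : List Char) : ∀ (N i j : Nat) (memo : PySem.Dict Nat Int),
    i + j ≤ N → j ≤ ys.length → edMemoInv xs ys memo →
    (bdist xs ys (ys.length+1) i j memo).1 = edE xs ys i j ∧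
      edMemoInv xs ys (bdist xs ys (ys.length+1) i j memo).2 := by
  intro N
  induction N with
  | zero =>
    intro i j memo hN hj hinv
    have hi0 : i = 0 := by omega
    have hj0 : j = 0 := by omega
    subst hi0; subst hj0
    refine ⟨by simp [bdist, edE_i0], ?_⟩
    simp only [bdist]
    exact hinv
  | succ N ih =>
    intro i j memo hN hj hinv
    cases j with
    | zero =>
      refine ⟨by simp [bdist, edE_i0], ?_⟩
      simp only [bdist]
      exact hinv
    | succ j =>
      cases i with
      | zero =>
        refine ⟨by rw [bdist, edE_0j xs ys (j+1) hj], ?_⟩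
        simp only [bdist]
        exact hinv
      | succ i =>
        rw [bdist]
        cases hget : memo.get? ((i+1) * (ys.length+1) + (j+1)) with
        | some v =>
          simp only
          exact ⟨(hinv i j v (by omega) hget).symm ▸ rfl, hinv⟩
        | none =>
          simp only
          have hjlt : j < ys.length := by omega
          obtain ⟨e1, v1⟩ := ih i j memo (by omega) (by omega) hinv
          obtain ⟨e2, v2⟩ := ih (i+1) j _ (by omega) (by omega) v1
          obtain ⟨e3, v3⟩ := ih i (j+1) _ (by omega) hj v2
          have hd : (if xs.getD i ' ' ≠ ys.getD j ' '
              then (bdist xs ys (ys.length+1) i j memo).1 + 1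
              else (bdist xs ys (ys.length+1) i j memo).1)
              = edE xs ys i j + (if xs.getD i ' ' = ys.getD j ' ' then 0 else 1) := by
            rw [e1]; split_ifs <;> simp_all
          have hv : min (min ((bdist xs ys (ys.length+1) (i+1) j
                (bdist xs ys (ys.length+1) i j memo).2).1 + 1)
              ((bdist xs ys (ys.length+1) i (j+1)
                (bdist xs ys (ys.length+1) (i+1) j
                  (bdist xs ys (ys.length+1) i j memo).2).2).1 + 1))
              (if xs.getD i ' ' ≠ ys.getD j ' '
                then (bdist xs ys (ys.length+1) i j memo).1 + 1
                else (bdist xs ys (ys.length+1) i j memo).1)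
              = edE xs ys (i+1) (j+1) := by
            rw [e2, e3, hd, edE_rec xs ys i j hjlt]
          refine ⟨hv, ?_⟩
          intro i' j' v' hj' hget'
          rw [PySem.Dict.get?_insert] at hget'
          by_cases hk : (i'+1) * (ys.length+1) + (j'+1) = (i+1) * (ys.length+1) + (j+1)
          · obtain ⟨hii, hjj⟩ := edKey_inj (ys.length+1) (i'+1) (i+1) (j'+1) (j+1)
              (by omega) (by omega) hk
            rw [if_pos hk] at hget'
            have : v' = edE xs ys (i+1) (j+1) := by
              injection hget' with h'
              rw [← h', hv]
            rw [this]
            congr 1 <;> omega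
          · rw [if_neg hk] at hget'
            exact v3 i' j' v' hj' hget'

-- option-valued running min
theorem edFoldl_optMin (l : List Int) (x : Int) :
    l.foldl (fun (o : Option Int) v => some (match o with | none => v | some b => min b v))
      (some x) = some (l.foldl min x) := by
  induction l generalizing x with
  | nil => rfl
  | cons h t ih => simp [List.foldl_cons, ih]

theorem edMap_range_getD (l : List Int) :
    (List.range l.length).map (fun j => l.getD j 0) = l := by
  apply List.ext_getElem
  · simp
  · intro i h1 h2
    simp [List.getD_eq_getElem?_getD, List.getElem?_eq_getElem h2]

-- B's outer fold: value is the running min of edE m 0 .. edE m (k-1), memo stays invariant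
theorem edAltFold (xs ys : List Char) : ∀ (k : Nat), k ≤ ys.length + 1 →
    ((List.range k).foldl
      (fun (p : Option Int × PySem.Dict Nat Int) j =>
        let q := bdist xs ys (ys.length+1) xs.length j p.2
        (some (match p.1 with | none => q.1 | some b => min b q.1), q.2))
      (none, PySem.Dict.empty)).1
      = ((List.range k).map (fun j => edE xs ys xs.length j)).foldl
          (fun (o : Option Int) v => some (match o with | none => v | some b => min b v)) none ∧
    edMemoInv xs ys ((List.range k).foldl
      (fun (p : Option Int × PySem.Dict Nat Int) j =>
        let q := bdist xs ys (ys.length+1) xs.length j p.2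
        (some (match p.1 with | none => q.1 | some b => min b q.1), q.2))
      (none, PySem.Dict.empty)).2 := by
  intro k
  induction k with
  | zero =>
    intro _
    refine ⟨rfl, ?_⟩
    intro i j v _ hget
    simp only [List.range_zero, List.foldl_nil] at hget
    rw [PySem.Dict.get?_empty] at hget
    exact absurd hget (by simp)
  | succ k ih =>
    intro hk
    obtain ⟨h1, h2⟩ := ih (by omega)
    rw [List.range_succ, List.foldl_append, List.foldl_cons, List.foldl_nil,
      List.map_append, List.foldl_append, List.map_singleton, List.foldl_cons, List.foldl_nil]
    obtain ⟨e, v⟩ := bdist_spec xs ys (xs.length + k) xs.length k _ le_rfl (by omega) h2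
    constructor
    · simp only [e, h1]
    · exact v

-- A's value in closed form
theorem edA_val (x y : String) :
    editDistance2 x y =
      (PySem.List.min? (edRowIt x.toList y.toList x.toList.length) (fun v => v)).getD 0 := by
  unfold editDistance2
  dsimp only
  rw [edInit x.toList.length y.toList.length, edOuter x.toList y.toList]
  have hlast : PySem.List.pyGet?
      ((List.range (x.toList.length+1)).map (edRowIt x.toList y.toList)) (-1)
      = some (edRowIt x.toList y.toList x.toList.length) := by
    simp [PySem.List.pyGet?, PySem.List.pyIdx?]
  rw [hlast]
  rfl

-- ===== VERDICT (by name: the statement is the Claim_ definition above) =====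
theorem editDistance2_spec : Claim_equal_editDistance2 := by
  intro x y _
  unfold Spec_editDistance2
  rw [edA_val]
  unfold editDistance2_alt
  dsimp only
  obtain ⟨h1, _⟩ := edAltFold x.toList y.toList (y.toList.length + 1) le_rfl
  rw [h1]
  obtain ⟨p0, ptail, hpe⟩ : ∃ p0 ptail,
      edRowIt x.toList y.toList x.toList.length = p0 :: ptail := by
    cases h : edRowIt x.toList y.toList x.toList.length with
    | nil =>
      have := edRowIt_length x.toList y.toList x.toList.length
      rw [h] at this; simp at this
    | cons a b => exact ⟨a, b, rfl⟩
  have hlen : y.toList.length + 1 = (p0 :: ptail).length := by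
    rw [← hpe, edRowIt_length]
  have hmap : (List.range (y.toList.length + 1)).map
      (fun j => edE x.toList y.toList x.toList.length j) = p0 :: ptail := by
    have := edMap_range_getD (p0 :: ptail)
    rw [← this, ← hlen]
    have hpe2 : edRowIt x.toList y.toList x.length = p0 :: ptail := by
      rw [← hpe, String.length_toList]
    apply List.map_congr_left
    intro j _
    simp [edE, hpe2]
  rw [hmap, hpe, PySem.List.min?_id_cons]
  rw [List.foldl_cons, edFoldl_optMin]
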